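-- pv_equiv track=rewrite | github.com/nemerna/agentic-collections | ocp-admin/scripts/cluster-report/aggregate.py | detect_node_role
-- ===== SOURCE A (Python) =====
-- def detect_node_role(labels):
--     if not labels:
--         return "worker"
--     prefix = "node-role.kubernetes.io/"
--     roles = []
--     for key in labels:
--         if key.startswith(prefix):
--             role = key[len(prefix):]
--             if role:
--                 roles.append(role)
--     if not roles:
--         return "worker"
--     priority = ["control-plane", "master", "infra", "worker"]
--     for p in priority:
--         if p in roles:
--             return p
--     return roles[0]
-- ===== SOURCE B (Python) =====
-- def detect_node_role(labels):
--     if not labels: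
--         return "worker"
--     prefix = "node-role.kubernetes.io/"
--     priority = ["control-plane", "master", "infra", "worker"]
--     best_role, best_rank = None, len(priority) + 1
--     for key in labels:
--         if key.startswith(prefix):
--             role = key[len(prefix):]
--             if role:
--                 rank = priority.index(role) if role in priority else len(priority)
--                 if rank < best_rank:
--                     best_role, best_rank = role, rank
--     return "worker" if best_role is None else best_role
-- ===== Notes on version B (the rewrite author's own statement) =====
-- stated objective: alternative
-- what changed: Replaces A's two-phase approach (collect all role suffixes into a list, then scan the priority list with membership tests over it) by a single pass that keeps a running best (role, rank) with strict-less-than updates, so no roles list and no second scan exist.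
import Mathlib
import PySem

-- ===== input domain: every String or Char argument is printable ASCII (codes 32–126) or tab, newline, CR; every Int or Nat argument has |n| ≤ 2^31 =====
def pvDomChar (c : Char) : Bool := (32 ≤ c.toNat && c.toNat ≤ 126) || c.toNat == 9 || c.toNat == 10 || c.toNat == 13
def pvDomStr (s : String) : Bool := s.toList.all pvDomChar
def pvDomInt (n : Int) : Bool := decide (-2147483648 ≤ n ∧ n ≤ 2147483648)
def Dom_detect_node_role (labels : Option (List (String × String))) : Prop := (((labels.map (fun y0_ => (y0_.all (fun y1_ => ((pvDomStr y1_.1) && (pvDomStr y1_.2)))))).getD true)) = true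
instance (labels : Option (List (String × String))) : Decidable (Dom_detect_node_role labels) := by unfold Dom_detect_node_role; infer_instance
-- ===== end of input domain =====

-- B replaces A's collect-then-scan (roles list + priority scan) by a single pass keeping a running best (role, rank); same result, similar cost (objective: alternative).

-- ===== PORT A =====
def detect_node_role (labels : Option (List (String × String))) : String :=
  match labels with
  | none => "worker"
  | some l =>
    if l.isEmpty then "worker" else
    let pfx := "node-role.kubernetes.io/"
    let roles := l.foldl (fun roles kv =>
      if PySem.Str.startswith kv.1 pfx then
        let role := PySem.Str.slice kv.1 (some (PySem.Str.len pfx)) none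
        if role ≠ "" then roles ++ [role] else roles
      else roles) []
    match roles with
    | [] => "worker"
    | r0 :: _ =>
      -- the 'for p in priority: if p in roles: return p' loop, unrolled over the 4-element literal
      if roles.contains "control-plane" then "control-plane"
      else if roles.contains "master" then "master"
      else if roles.contains "infra" then "infra"
      else if roles.contains "worker" then "worker"
      else r0

-- ===== PORT B =====
-- one update of the running best: rank = priority.index(role) if present else len(priority); strict < keeps the first minimal
def dnrStep (st : Option String × Nat) (role : String) : Option String × Nat :=
  let priority := ["control-plane", "master", "infra", "worker"]
  let rank := match PySem.List.index? priority role with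
              | some i => i
              | none => priority.length
  if rank < st.2 then (some role, rank) else st

def detect_node_role_alt (labels : Option (List (String × String))) : String :=
  match labels with
  | none => "worker"
  | some l =>
    if l.isEmpty then "worker" else
    let pfx := "node-role.kubernetes.io/"
    let best := l.foldl (fun st kv =>
      if PySem.Str.startswith kv.1 pfx then
        let role := PySem.Str.slice kv.1 (some (PySem.Str.len pfx)) none
        if role ≠ "" then dnrStep st role else st
      else st) (none, 5)
    match best.1 with
    | none => "worker"
    | some r => r

-- ===== PRECONDITION & SPEC =====
def Spec_detect_node_role (labels : Option (List (String × String))) (out : String) : Prop := out = detect_node_role_alt labels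
instance (labels : Option (List (String × String))) (out : String) : Decidable (Spec_detect_node_role labels out) := by unfold Spec_detect_node_role; infer_instance

-- ===== CLAIM (what is proved, stated in full; the proofs are below) =====
def Claim_equal_detect_node_role : Prop := ∀ (labels : Option (List (String × String))), Dom_detect_node_role labels → Spec_detect_node_role labels (detect_node_role labels)

-- ===== LEMMAS AND PROOFS =====

-- the role suffix a pair contributes (empty or singleton); identical in both ports
def dnrExtract (kv : String × String) : List String :=
  if PySem.Str.startswith kv.1 "node-role.kubernetes.io/" then
    let role := PySem.Str.slice kv.1 (some (PySem.Str.len "node-role.kubernetes.io/")) none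
    if role ≠ "" then [role] else []
  else []

-- explicit rank (proof-side)
def dnrRank (r : String) : Nat :=
  if r = "control-plane" then 0 else if r = "master" then 1
  else if r = "infra" then 2 else if r = "worker" then 3 else 4

-- first minimal-rank element of b :: rs (proof-side)
def dnrMf : String → List String → String
  | b, [] => b
  | b, r :: t => if dnrRank r < dnrRank b then dnrMf r t else dnrMf b t

theorem dnrIndex_eq (r : String) :
    (match PySem.List.index? ["control-plane", "master", "infra", "worker"] r with
      | some i => i
      | none => 4) = dnrRank r := by
  unfold dnrRank
  by_cases h1 : r = "control-plane"
  · subst h1; decide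
  · rw [PySem.List.index?_cons_of_ne _ (Ne.symm h1)]
    by_cases h2 : r = "master"
    · subst h2; decide
    · rw [PySem.List.index?_cons_of_ne _ (Ne.symm h2)]
      by_cases h3 : r = "infra"
      · subst h3; decide
      · rw [PySem.List.index?_cons_of_ne _ (Ne.symm h3)]
        by_cases h4 : r = "worker"
        · subst h4; decide
        · rw [PySem.List.index?_cons_of_ne _ (Ne.symm h4),
              (PySem.List.index?_eq_none_iff ([] : List String) r).mpr (by simp)]
          simp [h1, h2, h3, h4]

theorem dnrStep_eq (st : Option String × Nat) (r : String) :
    dnrStep st r = if dnrRank r < st.2 then (some r, dnrRank r) else st := by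
  show (if (match PySem.List.index? ["control-plane", "master", "infra", "worker"] r with
            | some i => i
            | none => 4) < st.2
        then (some r, (match PySem.List.index? ["control-plane", "master", "infra", "worker"] r with
            | some i => i
            | none => 4))
        else st) = _
  rw [dnrIndex_eq]

theorem dnrRank_lt_five (r : String) : dnrRank r < 5 := by
  unfold dnrRank; split_ifs
  all_goals simp

theorem dnrRank_eq_zero {r : String} (h : dnrRank r = 0) : r = "control-plane" := by
  unfold dnrRank at h; split_ifs at h <;> simp_all

theorem dnrRank_eq_one {r : String} (h : dnrRank r = 1) : r = "master" := by
  unfold dnrRank at h; split_ifs at h <;> simp_all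

theorem dnrRank_eq_two {r : String} (h : dnrRank r = 2) : r = "infra" := by
  unfold dnrRank at h; split_ifs at h <;> simp_all

theorem dnrRank_eq_three {r : String} (h : dnrRank r = 3) : r = "worker" := by
  unfold dnrRank at h; split_ifs at h <;> simp_all

theorem dnrMf_mem (b : String) (rs : List String) : dnrMf b rs ∈ b :: rs := by
  induction rs generalizing b with
  | nil => simp [dnrMf]
  | cons r t ih =>
    simp only [dnrMf]
    split_ifs with h
    · exact List.mem_cons_of_mem b (ih r)
    · rcases List.mem_cons.mp (ih b) with h' | h'
      · simp [h']
      · simp [h']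

theorem dnrMf_le (b : String) (rs : List String) :
    ∀ x ∈ b :: rs, dnrRank (dnrMf b rs) ≤ dnrRank x := by
  induction rs generalizing b with
  | nil => simp [dnrMf]
  | cons r t ih =>
    intro x hx
    simp only [dnrMf]
    rcases List.mem_cons.mp hx with rfl | hx'
    · split_ifs with h
      · exact le_trans (ih r r (by simp)) (le_of_lt h)
      · exact ih x x (by simp)
    · rcases List.mem_cons.mp hx' with rfl | hx''
      · split_ifs with h
        · exact ih x x (by simp)
        · exact le_trans (ih b b (by simp)) (by omega)
      · split_ifs with h
        · exact ih r x (by simp [hx''])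
        · exact ih b x (by simp [hx''])

theorem dnrMf_stays (b : String) (rs : List String)
    (h : ∀ x ∈ rs, dnrRank b ≤ dnrRank x) : dnrMf b rs = b := by
  induction rs generalizing b with
  | nil => rfl
  | cons r t ih =>
    simp only [dnrMf]
    rw [if_neg (by have := h r (by simp); omega)]
    exact ih b (fun x hx => h x (by simp [hx]))

-- B's inner fold from a 'some' state computes the first minimal-rank element
theorem dnr_foldl_some (rs : List String) (b : String) :
    rs.foldl dnrStep (some b, dnrRank b) = (some (dnrMf b rs), dnrRank (dnrMf b rs)) := by
  induction rs generalizing b with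
  | nil => rfl
  | cons r t ih =>
    simp only [List.foldl_cons, dnrStep_eq, dnrMf]
    split_ifs with h
    · exact ih r
    · exact ih b

-- A's selection chain equals the first minimal-rank element
theorem dnr_chain_eq_mf (r : String) (t : List String) :
    (if (r :: t).contains "control-plane" then "control-plane"
     else if (r :: t).contains "master" then "master"
     else if (r :: t).contains "infra" then "infra"
     else if (r :: t).contains "worker" then "worker"
     else r) = dnrMf r t := by
  have hmem := dnrMf_mem r t
  have hle := dnrMf_le r t
  by_cases h0 : "control-plane" ∈ r :: t
  · have h := hle _ h0
    rw [show dnrRank "control-plane" = 0 by simp [dnrRank]] at h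
    rw [dnrRank_eq_zero (Nat.le_zero.mp h)]
    simp [List.contains_eq_mem, h0]
  · have hne0 : dnrMf r t ≠ "control-plane" := fun he => h0 (he ▸ hmem)
    have z0 : dnrRank (dnrMf r t) ≠ 0 := fun hz => hne0 (dnrRank_eq_zero hz)
    by_cases h1 : "master" ∈ r :: t
    · have h := hle _ h1
      rw [show dnrRank "master" = 1 by simp [dnrRank]] at h
      rw [dnrRank_eq_one (r := dnrMf r t) (by omega)]
      simp [List.contains_eq_mem, h0, h1]
    · have hne1 : dnrMf r t ≠ "master" := fun he => h1 (he ▸ hmem)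
      have z1 : dnrRank (dnrMf r t) ≠ 1 := fun hz => hne1 (dnrRank_eq_one hz)
      by_cases h2 : "infra" ∈ r :: t
      · have h := hle _ h2
        rw [show dnrRank "infra" = 2 by simp [dnrRank]] at h
        rw [dnrRank_eq_two (r := dnrMf r t) (by omega)]
        simp [List.contains_eq_mem, h0, h1, h2]
      · have hne2 : dnrMf r t ≠ "infra" := fun he => h2 (he ▸ hmem)
        have z2 : dnrRank (dnrMf r t) ≠ 2 := fun hz => hne2 (dnrRank_eq_two hz)
        by_cases h3 : "worker" ∈ r :: t
        · have h := hle _ h3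
          rw [show dnrRank "worker" = 3 by simp [dnrRank]] at h
          rw [dnrRank_eq_three (r := dnrMf r t) (by omega)]
          simp [List.contains_eq_mem, h0, h1, h2, h3]
        · -- no priority role present: every rank is 4, so the running best keeps r
          have hall : ∀ x ∈ t, dnrRank r ≤ dnrRank x := by
            intro x hx
            have hx4 : dnrRank x = 4 := by
              unfold dnrRank; split_ifs with a b c d
              · exact absurd (a ▸ List.mem_cons_of_mem r hx) h0
              · exact absurd (b ▸ List.mem_cons_of_mem r hx) h1
              · exact absurd (c ▸ List.mem_cons_of_mem r hx) h2
              · exact absurd (d ▸ List.mem_cons_of_mem r hx) h3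
              · rfl
            rw [hx4]
            exact Nat.le_of_lt_succ (dnrRank_lt_five r)
          rw [dnrMf_stays r t hall]
          simp [List.contains_eq_mem, h0, h1, h2, h3]

-- A's roles-building fold is acc ++ flatMap of the per-pair extraction
theorem dnr_rolesFold (l : List (String × String)) (acc : List String) :
    l.foldl (fun roles kv =>
      if PySem.Str.startswith kv.1 "node-role.kubernetes.io/" then
        let role := PySem.Str.slice kv.1 (some (PySem.Str.len "node-role.kubernetes.io/")) none
        if role ≠ "" then roles ++ [role] else roles
      else roles) acc = acc ++ l.flatMap dnrExtract := by
  induction l generalizing acc with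
  | nil => simp
  | cons kv t ih =>
    simp only [List.foldl_cons, List.flatMap_cons, dnrExtract]
    split
    · split
      · rw [ih]; simp
      · rw [ih]; simp
    · rw [ih]; simp

-- B's fold over pairs is the dnrStep fold over the extracted roles
theorem dnr_bestFold (l : List (String × String)) (st : Option String × Nat) :
    l.foldl (fun st kv =>
      if PySem.Str.startswith kv.1 "node-role.kubernetes.io/" then
        let role := PySem.Str.slice kv.1 (some (PySem.Str.len "node-role.kubernetes.io/")) none
        if role ≠ "" then dnrStep st role else st
      else st) st = (l.flatMap dnrExtract).foldl dnrStep st := by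
  induction l generalizing st with
  | nil => simp
  | cons kv t ih =>
    simp only [List.foldl_cons, List.flatMap_cons, dnrExtract, List.foldl_append]
    split
    · split
      · rw [ih]; simp
      · rw [ih]; simp
    · rw [ih]; simp

-- the tails of the two ports agree on any list of extracted roles
theorem dnr_main (rs : List String) :
    (match rs with
     | [] => "worker"
     | r0 :: _ =>
       if rs.contains "control-plane" then "control-plane"
       else if rs.contains "master" then "master"
       else if rs.contains "infra" then "infra"
       else if rs.contains "worker" then "worker"
       else r0) =
    (match (rs.foldl dnrStep ((none : Option String), 5)).1 with
     | none => "worker"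
     | some r => r) := by
  cases rs with
  | nil => rfl
  | cons r t =>
    simp only [List.foldl_cons]
    rw [dnrStep_eq, if_pos (dnrRank_lt_five r), dnr_foldl_some]
    exact dnr_chain_eq_mf r t

-- ===== VERDICT (by name: the statement is the Claim_ definition above) =====
theorem detect_node_role_spec : Claim_equal_detect_node_role := by
  intro labels _
  unfold Spec_detect_node_role detect_node_role detect_node_role_alt
  cases labels with
  | none => rfl
  | some l =>
    by_cases hl : l.isEmpty
    · simp [hl]
    · simp only [hl, Bool.false_eq_true, if_false]
      rw [dnr_rolesFold l [], dnr_bestFold l, List.nil_append]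
      exact dnr_main (l.flatMap dnrExtract)
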